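-- pv_equiv track=rewrite | github.com/kylemunger/bebop-crossword | generator/backend/src/testKyle.py | find_duplicate_words_with_char_positions
-- ===== SOURCE A (Python) =====
-- def find_duplicate_words_with_char_positions(grid):
--     def extract_words_with_positions(line, is_vertical, start_index):
--         words_with_positions = []
--         current_word = []
--         for i, char in enumerate(line):
--             if char == '#':
--                 if len(current_word) > 1:
--                     words_with_positions.append((''.join(c for c, _ in current_word), current_word))
--                 current_word = []
--             else:
--                 pos = (i, start_index) if is_vertical else (start_index, i)
--                 current_word.append((char, pos))
--
--         if len(current_word) > 1:  # Add the last word if exists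
--             words_with_positions.append((''.join(c for c, _ in current_word), current_word))
--         return words_with_positions
--
--     # Extract horizontal and vertical words with character positions
--     all_words_with_positions = []
--     for i, row in enumerate(grid):
--         all_words_with_positions.extend(extract_words_with_positions(row, False, i))
--
--     for j in range(len(grid[0])):
--         column = ''.join(row[j] for row in grid)
--         all_words_with_positions.extend(extract_words_with_positions(column, True, j))
--
--     # Find duplicates
--     seen = {}
--     duplicates = {}
--     for word, char_positions in all_words_with_positions:
--         if word in seen:
--             if word in duplicates:
--                 duplicates[word].append(char_positions)
--             else:
--                 duplicates[word] = [seen[word], char_positions]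
--         else:
--             seen[word] = char_positions
--
--     return {word: positions for word, positions in duplicates.items() if len(positions) > 1}
-- ===== SOURCE B (Python) =====
-- def find_duplicate_words_with_char_positions(grid):
--     # B: split-based word extraction + one grouping pass ordered by second occurrence
--     def words_in(line, is_vertical, k):
--         out = []
--         start = 0
--         for seg in line.split('#'):
--             if len(seg) > 1:
--                 pairs = [(c, (start + o, k) if is_vertical else (k, start + o))
--                          for o, c in enumerate(seg)]
--                 out.append((seg, pairs))
--             start += len(seg) + 1
--         return out
--
--     all_words = []
--     for i, row in enumerate(grid):
--         all_words.extend(words_in(row, False, i))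
--     for j in range(len(grid[0])):
--         column = ''.join(row[j] for row in grid)
--         all_words.extend(words_in(column, True, j))
--
--     groups = {}
--     dup_order = []
--     for word, pairs in all_words:
--         bucket = groups.setdefault(word, [])
--         bucket.append(pairs)
--         if len(bucket) == 2:
--             dup_order.append(word)
--     return {w: groups[w] for w in dup_order}
-- ===== Notes on version B (the rewrite author's own statement) =====
-- stated objective: simpler
-- what changed: B extracts words by splitting each line/column on '#' with a running offset instead of A's char-by-char scan with a current-word accumulator, and replaces A's two-dict seen/duplicates detection by one grouping pass (bucket per word, words recorded in order of their second occurrence).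
import Mathlib
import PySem

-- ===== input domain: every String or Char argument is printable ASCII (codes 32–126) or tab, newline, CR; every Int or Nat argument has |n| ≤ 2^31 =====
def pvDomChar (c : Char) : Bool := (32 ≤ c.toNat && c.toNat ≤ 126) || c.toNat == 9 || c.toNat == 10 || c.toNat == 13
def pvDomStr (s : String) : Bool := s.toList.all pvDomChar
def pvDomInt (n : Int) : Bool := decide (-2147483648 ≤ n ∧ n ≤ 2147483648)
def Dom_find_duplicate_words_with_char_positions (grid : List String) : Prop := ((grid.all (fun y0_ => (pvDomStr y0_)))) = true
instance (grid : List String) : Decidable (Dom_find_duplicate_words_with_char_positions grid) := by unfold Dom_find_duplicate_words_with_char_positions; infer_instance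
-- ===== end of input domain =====

-- B replaces A's char-by-char word scanner by a split-on-'#' pass and A's seen/duplicates
-- two-dict detection by one grouping pass that records words in order of their second
-- occurrence (objective: simpler). Both raise on an empty grid and on a row shorter than
-- the first row; Pre_ excludes exactly those inputs.

-- ===== PORT A =====
-- the repeated "if len(current_word) > 1: append((''.join(..), current_word))" snippet
def pvFinishWord (acc : List (String × List (String × (Int × Int))))
    (cur : List (String × (Int × Int))) : List (String × List (String × (Int × Int))) :=
  if 1 < cur.length then acc ++ [(PySem.Str.join "" (cur.map Prod.fst), cur)] else acc

-- body of the 'for i, char in enumerate(line)' loop (state = (words_with_positions, current_word))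
def pvStepA (isVert : Bool) (k : Int)
    (st : List (String × List (String × (Int × Int))) × List (String × (Int × Int)))
    (ic : Int × Char) :
    List (String × List (String × (Int × Int))) × List (String × (Int × Int)) :=
  if ic.2 == '#' then (pvFinishWord st.1 st.2, [])
  else (st.1, st.2 ++ [(String.ofList [ic.2], if isVert then (ic.1, k) else (k, ic.1))])

-- extract_words_with_positions(line, is_vertical, start_index)
def pvExtractA (line : List Char) (isVert : Bool) (k : Int) :
    List (String × List (String × (Int × Int))) :=
  let st := (PySem.List.enumerate line 0).foldl (pvStepA isVert k) ([], [])
  pvFinishWord st.1 st.2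

-- body of A's 'for word, char_positions in all_words_with_positions' loop (state = (seen, duplicates))
def pvDupStepA
    (st : PySem.Dict String (List (String × (Int × Int))) ×
          PySem.Dict String (List (List (String × (Int × Int)))))
    (wc : String × List (String × (Int × Int))) :
    PySem.Dict String (List (String × (Int × Int))) ×
    PySem.Dict String (List (List (String × (Int × Int)))) :=
  if st.1.contains wc.1 then
    if st.2.contains wc.1 then
      (st.1, st.2.modify wc.1 [] (· ++ [wc.2]))              -- duplicates[word].append(cp)
    else
      (st.1, st.2.insert wc.1 [st.1.getD wc.1 [], wc.2])     -- duplicates[word] = [seen[word], cp]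
  else (st.1.insert wc.1 wc.2, st.2)                          -- seen[word] = cp

def find_duplicate_words_with_char_positions (grid : List String) :
    List (String × List (List (String × (Int × Int)))) :=
  let allW := (PySem.List.enumerate grid 0).foldl
    (fun acc p => acc ++ pvExtractA p.2.toList false p.1) []
  -- grid[0] raises IndexError on an empty grid; row[j] raises if a row is shorter than
  -- grid[0]: both excluded by Pre_, so the .getD defaults are never reached inside Pre_.
  let allW2 := (PySem.List.pyRange 0 (PySem.Str.len ((PySem.List.pyGet? grid 0).getD "")) 1).foldl
    (fun acc j =>
      acc ++ pvExtractA (grid.map (fun row => (PySem.Chars.pyGet? row.toList j).getD ' ')) true j)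
    allW
  let st := allW2.foldl pvDupStepA (PySem.Dict.empty, PySem.Dict.empty)
  st.2.items.filter (fun p => 1 < p.2.length)

-- ===== PORT B =====
-- [(c, position of c) for o, c in enumerate(seg)] with seg starting at offset 'start'
def pvSegPairs (seg : List Char) (isVert : Bool) (k start : Int) :
    List (String × (Int × Int)) :=
  (PySem.List.enumerate seg 0).map
    (fun oc => (String.ofList [oc.2], if isVert then (start + oc.1, k) else (k, start + oc.1)))

-- body of B's 'for seg in line.split('#')' loop (state = (out, start))
def pvWordStepB (isVert : Bool) (k : Int)
    (st : List (String × List (String × (Int × Int))) × Int) (seg : List Char) :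
    List (String × List (String × (Int × Int))) × Int :=
  (if 1 < seg.length then st.1 ++ [(String.ofList seg, pvSegPairs seg isVert k st.2)] else st.1,
   st.2 + (seg.length : Int) + 1)

-- words_in(line, is_vertical, k)
def pvWordsB (line : List Char) (isVert : Bool) (k : Int) :
    List (String × List (String × (Int × Int))) :=
  ((line.splitOn '#').foldl (pvWordStepB isVert k) ([], 0)).1

-- body of B's grouping loop (state = (groups, dup_order))
def pvGroupStepB
    (st : PySem.Dict String (List (List (String × (Int × Int)))) × List String)
    (wc : String × List (String × (Int × Int))) :
    PySem.Dict String (List (List (String × (Int × Int)))) × List String :=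
  let g := (st.1.setdefault wc.1 []).modify wc.1 [] (· ++ [wc.2])  -- setdefault, then bucket.append
  (g, if (g.getD wc.1 []).length == 2 then st.2 ++ [wc.1] else st.2)

def find_duplicate_words_with_char_positions_alt (grid : List String) :
    List (String × List (List (String × (Int × Int)))) :=
  let allW := (PySem.List.enumerate grid 0).foldl
    (fun acc p => acc ++ pvWordsB p.2.toList false p.1) []
  -- same column construction as A (grid[0] / row[j] raise on the inputs Pre_ excludes)
  let allW2 := (PySem.List.pyRange 0 (PySem.Str.len ((PySem.List.pyGet? grid 0).getD "")) 1).foldl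
    (fun acc j =>
      acc ++ pvWordsB (grid.map (fun row => (PySem.Chars.pyGet? row.toList j).getD ' ')) true j)
    allW
  let st := allW2.foldl pvGroupStepB (PySem.Dict.empty, [])
  st.2.map (fun w => (w, st.1.getD w []))

-- ===== PRECONDITION & SPEC =====
-- Pre_ excludes exactly the inputs where the Python A raises IndexError (an empty grid,
-- or a row shorter than the first row); B raises there too.
def Pre_find_duplicate_words_with_char_positions (grid : List String) : Prop :=
  grid ≠ [] ∧ ∀ row ∈ grid, grid.headI.toList.length ≤ row.toList.length
instance (grid : List String) : Decidable (Pre_find_duplicate_words_with_char_positions grid) := by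
  unfold Pre_find_duplicate_words_with_char_positions; infer_instance

def pvWitness_find_duplicate_words_with_char_positions : List String := ["ab#ab", "ab#cd"]

def Spec_find_duplicate_words_with_char_positions (grid : List String)
    (out : List (String × List (List (String × (Int × Int))))) : Prop :=
  out = find_duplicate_words_with_char_positions_alt grid
instance (grid : List String) (out : List (String × List (List (String × (Int × Int))))) :
    Decidable (Spec_find_duplicate_words_with_char_positions grid out) := by
  unfold Spec_find_duplicate_words_with_char_positions; infer_instance

-- ===== CLAIM (what is proved, stated in full; the proofs are below) =====
def Claim_equal_find_duplicate_words_with_char_positions : Prop :=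
  ∀ (grid : List String), Dom_find_duplicate_words_with_char_positions grid →
    Pre_find_duplicate_words_with_char_positions grid →
    Spec_find_duplicate_words_with_char_positions grid (find_duplicate_words_with_char_positions grid)

-- ===== LEMMAS AND PROOFS =====

-- proof-side view of a word's (char, position) pairs, by structural recursion on the segment
def pvPairs (isVert : Bool) (k : Int) : List Char → Int → List (String × (Int × Int))
  | [], _ => []
  | c :: t, i => (String.ofList [c], if isVert then (i, k) else (k, i)) :: pvPairs isVert k t (i + 1)

-- proof-side view of B's fold over the remaining segments, with a pending current word
def pvBAux (isVert : Bool) (k : Int) :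
    List (List Char) → Int → List (String × List (String × (Int × Int))) →
    List (String × (Int × Int)) → List (String × List (String × (Int × Int)))
  | [], _, acc, cur => pvFinishWord acc cur
  | seg :: rest, s, acc, cur =>
      pvBAux isVert k rest (s + (seg.length : Int) + 1)
        (pvFinishWord acc (cur ++ pvPairs isVert k seg s)) []

lemma pvFinishWord_nil (acc : List (String × List (String × (Int × Int)))) :
    pvFinishWord acc [] = acc := by
  simp [pvFinishWord]

lemma pvSegPairs_shift (isVert : Bool) (k : Int) :
    ∀ (seg : List Char) (s j : Int),
      (PySem.List.enumerate seg j).map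
        (fun oc => (String.ofList [oc.2], if isVert then (s + oc.1, k) else (k, s + oc.1)))
      = pvPairs isVert k seg (s + j) := by
  intro seg
  induction seg with
  | nil => intro s j; simp [PySem.List.enumerate_nil, pvPairs]
  | cons c t ih =>
      intro s j
      rw [PySem.List.enumerate_cons, List.map_cons, ih s (j + 1), pvPairs]
      rw [← add_assoc]

lemma pvSegPairs_eq_pvPairs (isVert : Bool) (k : Int) (seg : List Char) (s : Int) :
    pvSegPairs seg isVert k s = pvPairs isVert k seg s := by
  have h := pvSegPairs_shift isVert k seg s 0
  rw [add_zero] at h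
  exact h

lemma pvPairs_map_fst (isVert : Bool) (k : Int) :
    ∀ (seg : List Char) (s : Int),
      (pvPairs isVert k seg s).map Prod.fst = seg.map (fun c => String.ofList [c]) := by
  intro seg
  induction seg with
  | nil => intro s; simp [pvPairs]
  | cons c t ih => intro s; simp [pvPairs, ih]

lemma pvPairs_length (isVert : Bool) (k : Int) :
    ∀ (seg : List Char) (s : Int), (pvPairs isVert k seg s).length = seg.length := by
  intro seg
  induction seg with
  | nil => intro s; simp [pvPairs]
  | cons c t ih => intro s; simp [pvPairs, ih]

lemma pvJoin_pairs (isVert : Bool) (k : Int) (seg : List Char) (s : Int) :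
    PySem.Str.join "" ((pvPairs isVert k seg s).map Prod.fst) = String.ofList seg := by
  rw [pvPairs_map_fst]
  have h : (PySem.Str.join "" (seg.map (fun c => String.ofList [c]))).toList = seg := by
    rw [PySem.Str.toList_join]
    have h2 : (seg.map (fun c => String.ofList [c])).map String.toList
        = seg.map (fun c => [c]) := by
      simp [List.map_map, Function.comp, String.toList_ofList]
    rw [h2, show ("" : String).toList = [] from rfl]
    exact PySem.Chars.join_nil_singletons seg
  calc PySem.Str.join "" (seg.map (fun c => String.ofList [c]))
      = String.ofList ((PySem.Str.join "" (seg.map (fun c => String.ofList [c]))).toList) := by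
        rw [String.ofList_toList]
    _ = String.ofList seg := by rw [h]

lemma pvFinishWord_pairs (isVert : Bool) (k : Int)
    (acc : List (String × List (String × (Int × Int)))) (seg : List Char) (s : Int) :
    pvFinishWord acc (pvPairs isVert k seg s)
      = if 1 < seg.length then acc ++ [(String.ofList seg, pvPairs isVert k seg s)] else acc := by
  simp [pvFinishWord, pvPairs_length, pvJoin_pairs]

lemma pvFoldB_eq_bAux (isVert : Bool) (k : Int) :
    ∀ (segs : List (List Char)) (acc : List (String × List (String × (Int × Int)))) (s : Int),
      (segs.foldl (pvWordStepB isVert k) (acc, s)).1 = pvBAux isVert k segs s acc [] := by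
  intro segs
  induction segs with
  | nil => intro acc s; simp [pvBAux, pvFinishWord_nil]
  | cons seg rest ih =>
      intro acc s
      rw [List.foldl_cons, pvBAux]
      rw [ih]
      congr 1
      rw [List.nil_append, pvFinishWord_pairs]
      simp [pvWordStepB, pvSegPairs_eq_pvPairs]

lemma pvWordsB_eq_bAux (line : List Char) (isVert : Bool) (k : Int) :
    pvWordsB line isVert k = pvBAux isVert k (line.splitOn '#') 0 [] [] := by
  rw [pvWordsB, pvFoldB_eq_bAux]

lemma pvScanA_eq_bAux (isVert : Bool) (k : Int) :
    ∀ (line : List Char) (s : Int)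
      (acc : List (String × List (String × (Int × Int)))) (cur : List (String × (Int × Int))),
      pvFinishWord ((PySem.List.enumerate line s).foldl (pvStepA isVert k) (acc, cur)).1
          ((PySem.List.enumerate line s).foldl (pvStepA isVert k) (acc, cur)).2
      = pvBAux isVert k (line.splitOn '#') s acc cur := by
  intro line
  induction line with
  | nil =>
      intro s acc cur
      simp only [PySem.List.enumerate_nil, List.foldl_nil]
      have hsp : List.splitOn '#' ([] : List Char) = [[]] := by
        simp [List.splitOn, List.splitOnP_nil]
      rw [hsp, pvBAux, pvBAux, pvPairs]
      simp [pvFinishWord_nil]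
  | cons c t ih =>
      intro s acc cur
      rw [PySem.List.enumerate_cons, List.foldl_cons]
      by_cases hc : c = '#'
      · subst hc
        have hstep : pvStepA isVert k (acc, cur) (s, '#') = (pvFinishWord acc cur, []) := by
          simp [pvStepA]
        rw [hstep, ih]
        have hsp : List.splitOn '#' ('#' :: t) = [] :: List.splitOn '#' t := by
          simp [List.splitOn, List.splitOnP_cons]
        rw [hsp, pvBAux, pvPairs]
        simp
      · have hstep : pvStepA isVert k (acc, cur) (s, c)
            = (acc, cur ++ [(String.ofList [c], if isVert then (s, k) else (k, s))]) := by
          simp [pvStepA, hc]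
        rw [hstep, ih]
        obtain ⟨seg0, tail, hsp⟩ :=
          List.exists_cons_of_ne_nil (List.splitOnP_ne_nil (· == '#') t)
        have hsp' : List.splitOn '#' (c :: t) = (c :: seg0) :: tail := by
          simp only [List.splitOn, List.splitOnP_cons]
          rw [if_neg (by simpa using hc)]
          rw [show List.splitOnP (· == '#') t = seg0 :: tail from hsp]
          rfl
        rw [hsp', show List.splitOn '#' t = seg0 :: tail from hsp]
        rw [pvBAux, pvBAux]
        congr 1
        · simp only [List.length_cons]
          push_cast
          ring
        · rw [pvPairs]
          simp

lemma pvExtract_eq (line : List Char) (isVert : Bool) (k : Int) :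
    pvExtractA line isVert k = pvWordsB line isVert k := by
  show pvFinishWord ((PySem.List.enumerate line 0).foldl (pvStepA isVert k) ([], [])).1
      ((PySem.List.enumerate line 0).foldl (pvStepA isVert k) ([], [])).2 = _
  rw [pvScanA_eq_bAux, pvWordsB_eq_bAux]

-- invariant tying A's (seen, duplicates) to B's (groups, dup_order)
def pvInv (seen : PySem.Dict String (List (String × (Int × Int))))
    (dups : PySem.Dict String (List (List (String × (Int × Int)))))
    (groups : PySem.Dict String (List (List (String × (Int × Int)))))
    (order : List String) : Prop :=
  dups.items = order.map (fun w => (w, groups.getD w [])) ∧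
  order.Nodup ∧
  (∀ w, seen.get? w = (groups.getD w []).head?) ∧
  (∀ w, w ∈ order ↔ 2 ≤ (groups.getD w []).length)

lemma pvInv_step (seen : PySem.Dict String (List (String × (Int × Int))))
    (dups groups : PySem.Dict String (List (List (String × (Int × Int)))))
    (order : List String) (wc : String × List (String × (Int × Int)))
    (h : pvInv seen dups groups order) :
    pvInv (pvDupStepA (seen, dups) wc).1 (pvDupStepA (seen, dups) wc).2
      (pvGroupStepB (groups, order) wc).1 (pvGroupStepB (groups, order) wc).2 := by
  obtain ⟨w, p⟩ := wc
  obtain ⟨hitems, hnd, hseen, hord⟩ := h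
  have hkeys : dups.keys = order := by
    show dups.items.map Prod.fst = order
    rw [hitems, List.map_map]
    exact (List.map_congr_left fun v _ => rfl).trans (List.map_id _)
  have hgw : ((groups.setdefault w []).modify w [] (· ++ [p])).getD w []
      = groups.getD w [] ++ [p] := by
    rw [PySem.Dict.getD_modify_self, PySem.Dict.getD_setdefault_self]
  have hgv : ∀ v, v ≠ w → ((groups.setdefault w []).modify w [] (· ++ [p])).getD v []
      = groups.getD v [] := by
    intro v hv
    rw [PySem.Dict.getD_eq_get?_getD, PySem.Dict.modify,
        PySem.Dict.get?_insert_of_ne _ _ hv, PySem.Dict.get?_setdefault_of_ne _ _ hv,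
        ← PySem.Dict.getD_eq_get?_getD]
  rcases hl : groups.getD w [] with _ | ⟨a, _ | ⟨b, rest⟩⟩
  · -- first occurrence of w
    have hsc : seen.contains w = false := by
      rw [PySem.Dict.contains_eq_isSome_get?, hseen, hl]; rfl
    have hwo : w ∉ order := by
      intro hw; have := (hord w).mp hw; rw [hl] at this; simp at this
    simp only [pvDupStepA, pvGroupStepB, hsc, Bool.false_eq_true, if_false]
    have hlen : ((((groups.setdefault w []).modify w [] (· ++ [p])).getD w []).length == 2)
        = false := by
      rw [hgw, hl]; rfl
    simp only [hlen, Bool.false_eq_true, if_false]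
    refine ⟨?_, hnd, ?_, ?_⟩
    · rw [hitems]
      refine List.map_congr_left ?_
      intro v hv
      have hvw : v ≠ w := fun hvw => hwo (hvw ▸ hv)
      rw [hgv v hvw]
    · intro v
      by_cases hvw : v = w
      · subst hvw
        rw [PySem.Dict.get?_insert_self, hgw, hl]; rfl
      · rw [PySem.Dict.get?_insert_of_ne _ _ hvw, hseen, hgv v hvw]
    · intro v
      by_cases hvw : v = w
      · subst hvw
        rw [hgw, hl]
        simp [hwo]
      · rw [hgv v hvw]; exact hord v
  · -- second occurrence of w
    have hsc : seen.contains w = true := by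
      rw [PySem.Dict.contains_eq_isSome_get?, hseen, hl]; rfl
    have hwo : w ∉ order := by
      intro hw; have := (hord w).mp hw; rw [hl] at this; simp at this
    have hdc : dups.contains w = false := by
      by_contra hb
      have : dups.contains w = true := by
        cases hx : dups.contains w
        · exact absurd hx hb
        · rfl
      exact hwo (hkeys ▸ (PySem.Dict.contains_iff_mem_keys dups w).mp this)
    have hseenD : seen.getD w [] = a := by
      rw [PySem.Dict.getD_eq_get?_getD, hseen, hl]; rfl
    simp only [pvDupStepA, pvGroupStepB, hsc, hdc, Bool.false_eq_true, if_false, if_true]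
    have hlen : ((((groups.setdefault w []).modify w [] (· ++ [p])).getD w []).length == 2)
        = true := by
      rw [hgw, hl]; rfl
    simp only [hlen, if_true]
    refine ⟨?_, ?_, ?_, ?_⟩
    · rw [PySem.Dict.items_insert_of_not_contains _ _ hdc, hitems, List.map_append]
      congr 1
      · refine List.map_congr_left ?_
        intro v hv
        have hvw : v ≠ w := fun hvw => hwo (hvw ▸ hv)
        rw [hgv v hvw]
      · simp [hseenD, hgw, hl]
    · refine List.Nodup.append hnd (List.nodup_singleton w) ?_
      intro v hv hv2
      rw [List.mem_singleton] at hv2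
      exact hwo (hv2 ▸ hv)
    · intro v
      by_cases hvw : v = w
      · subst hvw
        rw [hseen, hgw, hl]; rfl
      · rw [hseen, hgv v hvw]
    · intro v
      by_cases hvw : v = w
      · subst hvw
        rw [hgw, hl]
        simp
      · rw [hgv v hvw]
        simp only [List.mem_append, List.mem_singleton, hvw, or_false]
        exact hord v
  · -- third or later occurrence of w
    have hsc : seen.contains w = true := by
      rw [PySem.Dict.contains_eq_isSome_get?, hseen, hl]; rfl
    have hwo : w ∈ order := (hord w).mpr (by rw [hl]; simp)
    have hdc : dups.contains w = true :=
      (PySem.Dict.contains_iff_mem_keys dups w).mpr (hkeys ▸ hwo)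
    have hdnd : dups.keys.Nodup := by rw [hkeys]; exact hnd
    have hdget : dups.getD w [] = groups.getD w [] := by
      have hmem : (w, groups.getD w []) ∈ dups.items := by
        rw [hitems]; exact List.mem_map_of_mem hwo
      exact PySem.Dict.getD_of_mem_items _ hmem hdnd []
    simp only [pvDupStepA, pvGroupStepB, hsc, hdc, if_true]
    have hlen : ((((groups.setdefault w []).modify w [] (· ++ [p])).getD w []).length == 2)
        = false := by
      rw [hgw, hl]
      simp
    simp only [hlen, Bool.false_eq_true, if_false]
    refine ⟨?_, hnd, ?_, ?_⟩
    · rw [PySem.Dict.modify, PySem.Dict.items_insert_of_contains _ _ hdc, hitems,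
        List.map_map]
      refine List.map_congr_left ?_
      intro v hv
      by_cases hvw : v = w
      · subst hvw
        simp [hdget, hgw]
      · simp [Function.comp, hvw, hgv v hvw]
    · intro v
      by_cases hvw : v = w
      · subst hvw
        rw [hseen, hgw, hl]; rfl
      · rw [hseen, hgv v hvw]
    · intro v
      by_cases hvw : v = w
      · subst hvw
        rw [hgw, hl]
        simp [hwo]
      · rw [hgv v hvw]
        exact hord v

lemma pvDedup_fold (l : List (String × List (String × (Int × Int))))
    (seen : PySem.Dict String (List (String × (Int × Int))))
    (dups groups : PySem.Dict String (List (List (String × (Int × Int)))))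
    (order : List String) (h : pvInv seen dups groups order) :
    (l.foldl pvDupStepA (seen, dups)).2.items.filter (fun p => 1 < p.2.length)
    = ((l.foldl pvGroupStepB (groups, order)).2.map
        (fun w => (w, (l.foldl pvGroupStepB (groups, order)).1.getD w []))) := by
  induction l generalizing seen dups groups order with
  | nil =>
      obtain ⟨hitems, _, _, hord⟩ := h
      simp only [List.foldl_nil]
      rw [hitems]
      rw [List.filter_eq_self.mpr]
      intro p hp
      obtain ⟨v, hv, hvp⟩ := List.mem_map.mp hp
      subst hvp
      have := (hord v).mp hv
      simpa using by omega
  | cons wc t ih =>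
      simp only [List.foldl_cons]
      have hstep := pvInv_step seen dups groups order wc h
      exact ih _ _ _ _ hstep

lemma pvInv_init : pvInv PySem.Dict.empty PySem.Dict.empty PySem.Dict.empty [] := by
  refine ⟨rfl, List.nodup_nil, ?_, ?_⟩
  · intro w
    rw [PySem.Dict.get?_empty, PySem.Dict.getD_empty]
    rfl
  · intro w
    rw [PySem.Dict.getD_empty]
    simp

-- ===== VERDICT (by name: the statement is the Claim_ definition above) =====
theorem find_duplicate_words_with_char_positions_spec :
    Claim_equal_find_duplicate_words_with_char_positions := by
  intro grid _ _
  show _ = _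
  simp only [find_duplicate_words_with_char_positions,
    find_duplicate_words_with_char_positions_alt, pvExtract_eq]
  exact pvDedup_fold _ _ _ _ _ pvInv_init
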